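-- pv_equiv track=rewrite | github.com/acordier16/google-foobar | level4.2/escape-pods.py | transform_matrix_into_single_source_and_sink
-- ===== SOURCE A (Python) =====
-- MAXIMUM_FLOW = 2000000  # or float("Inf")
--
-- def transform_matrix_into_single_source_and_sink(entrances, exits, matrix):
--     # We put the source in the 0 position
--     source_row = [0 for i in range(len(matrix))]
--     for i in range(len(source_row)):
--         if i in entrances:
--             source_row[i] = MAXIMUM_FLOW
--     matrix = [source_row] + matrix
--
--     for i in range(len(matrix)):
--         matrix[i] = [0] + matrix[i]
--
--     # We now put the sink in the -1 position
--     exits = [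
--         exit + 1 for exit in exits
--     ]  # we have to shift the exits because we added the single source
--     for i in range(len(matrix)):
--         if i in exits:
--             matrix[i].append(MAXIMUM_FLOW)
--         else:
--             matrix[i].append(0)
--     matrix.append([0 for i in range(len(matrix[0]))])
--     return matrix
-- ===== SOURCE B (Python) =====
-- def transform_matrix_into_single_source_and_sink(entrances, exits, matrix):
--     MAXIMUM_FLOW = 2000000
--     n = len(matrix)
--     ent = set(entrances)
--     exi = set(exits)
--
--     def width(i):
--         # row widths of the augmented matrix (rows keep their own original length)
--         return (n if i == 0 or i == n + 1 else len(matrix[i - 1])) + 2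
--
--     def cell(i, j, w):
--         # closed-form value of output cell (i, j) in a row of width w
--         if j == 0 or i == n + 1:
--             return 0
--         if j == w - 1:
--             return MAXIMUM_FLOW if (i - 1) in exi else 0
--         if i == 0:
--             return MAXIMUM_FLOW if (j - 1) in ent else 0
--         return matrix[i - 1][j - 1]
--
--     return [[cell(i, j, width(i)) for j in range(width(i))] for i in range(n + 2)]
-- ===== Notes on version B (the rewrite author's own statement) =====
-- stated objective: alternative
-- what changed: B replaces A's four staged in-place mutation passes (build source row, prepend it, prepend a zero column, append shifted-exit flags, append sink row) by direct generation of the output: it iterates once over the output's own (row, column) index grid and computes every cell from a closed-form rule (source/sink borders and interior copy); entrance/exit membership moves from per-row linear list scans to set lookups.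
import Mathlib
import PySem

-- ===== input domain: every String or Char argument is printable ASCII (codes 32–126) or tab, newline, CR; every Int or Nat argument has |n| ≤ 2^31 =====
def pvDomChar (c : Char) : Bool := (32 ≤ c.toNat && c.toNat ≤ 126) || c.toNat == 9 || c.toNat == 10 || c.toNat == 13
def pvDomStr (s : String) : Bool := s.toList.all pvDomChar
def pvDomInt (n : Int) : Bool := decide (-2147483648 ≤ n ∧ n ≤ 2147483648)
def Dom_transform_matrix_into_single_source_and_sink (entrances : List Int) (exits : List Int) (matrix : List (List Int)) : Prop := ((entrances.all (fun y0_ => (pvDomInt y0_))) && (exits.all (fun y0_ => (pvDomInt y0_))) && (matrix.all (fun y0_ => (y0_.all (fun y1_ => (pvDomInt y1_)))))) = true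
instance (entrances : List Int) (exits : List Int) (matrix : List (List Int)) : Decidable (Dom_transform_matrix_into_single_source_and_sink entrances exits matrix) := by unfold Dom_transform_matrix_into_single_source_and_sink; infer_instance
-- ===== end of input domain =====

-- B computes each output cell directly from a closed-form rule on its (row, column) index pair
-- (with set-based membership), iterating over the output's index space, instead of A's four
-- staged in-place mutation passes over the input matrix; same return value everywhere.

-- ===== PORT A =====
def pyMaxFlow : Int := 2000000  -- MAXIMUM_FLOW

-- literal port of A: each Python index-mutation loop is a foldl over the same range,
-- mutating the list state with List.set at the (in-range, nonnegative) index
def transform_matrix_into_single_source_and_sink (entrances : List Int) (exits : List Int) (matrix : List (List Int)) : List (List Int) :=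
  let source_row0 : List Int := (PySem.List.pyRange 0 (matrix.length : Int) 1).map (fun _ => 0)
  let source_row : List Int :=
    (PySem.List.pyRange 0 (source_row0.length : Int) 1).foldl
      (fun s i => if entrances.contains i then s.set i.toNat pyMaxFlow else s) source_row0
  let m1 : List (List Int) := [source_row] ++ matrix
  let m2 : List (List Int) :=
    (PySem.List.pyRange 0 (m1.length : Int) 1).foldl
      (fun m i => m.set i.toNat ([0] ++ m.getD i.toNat [])) m1
  let exits2 : List Int := exits.map (fun e => e + 1)
  let m3 : List (List Int) :=
    (PySem.List.pyRange 0 (m2.length : Int) 1).foldl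
      (fun m i => m.set i.toNat (m.getD i.toNat [] ++ [if exits2.contains i then pyMaxFlow else 0])) m2
  m3 ++ [(PySem.List.pyRange 0 ((m3.getD 0 []).length : Int) 1).map (fun _ => 0)]

-- ===== PORT B =====
-- port of Source B: sets of entrances/exits, then one pass over the OUTPUT index grid,
-- each cell given by the closed-form rule `cell` (row widths by `width`)
def transform_matrix_into_single_source_and_sink_alt (entrances : List Int) (exits : List Int) (matrix : List (List Int)) : List (List Int) :=
  let maxFlow : Int := 2000000
  let n : Nat := matrix.length
  let ent : PySem.Set Int := PySem.Set.ofList entrances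
  let exi : PySem.Set Int := PySem.Set.ofList exits
  let width : Int → Int := fun i =>
    (if i = 0 ∨ i = (n : Int) + 1 then (n : Int)
     else ((PySem.List.pyGetD matrix (i - 1) []).length : Int)) + 2
  let cell : Int → Int → Int → Int := fun i j w =>
    if j = 0 ∨ i = (n : Int) + 1 then 0
    else if j = w - 1 then (if PySem.Set.contains exi (i - 1) then maxFlow else 0)
    else if i = 0 then (if PySem.Set.contains ent (j - 1) then maxFlow else 0)
    else PySem.List.pyGetD (PySem.List.pyGetD matrix (i - 1) []) (j - 1) 0
  (PySem.List.pyRange 0 ((n : Int) + 2) 1).map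
    (fun i => (PySem.List.pyRange 0 (width i) 1).map (fun j => cell i j (width i)))

-- ===== PRECONDITION & SPEC =====
def Spec_transform_matrix_into_single_source_and_sink (entrances : List Int) (exits : List Int) (matrix : List (List Int)) (out : List (List Int)) : Prop := out = transform_matrix_into_single_source_and_sink_alt entrances exits matrix
instance (entrances : List Int) (exits : List Int) (matrix : List (List Int)) (out : List (List Int)) : Decidable (Spec_transform_matrix_into_single_source_and_sink entrances exits matrix out) := by unfold Spec_transform_matrix_into_single_source_and_sink; infer_instance

-- ===== CLAIM (what is proved, stated in full; the proofs are below) =====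
def Claim_equal_transform_matrix_into_single_source_and_sink : Prop := ∀ (entrances : List Int) (exits : List Int) (matrix : List (List Int)), Dom_transform_matrix_into_single_source_and_sink entrances exits matrix → Spec_transform_matrix_into_single_source_and_sink entrances exits matrix (transform_matrix_into_single_source_and_sink entrances exits matrix)

-- ===== LEMMAS AND PROOFS =====

-- the index-set loops of A, elementwise: folding `set i (g i s[i])` over range(0,n) maps g under the first n indices
theorem pv_foldl_set_length {α : Type} (g : Int → α → α) (d : α) (r : List Int) (l : List α) :
    (r.foldl (fun s i => s.set i.toNat (g i (s.getD i.toNat d))) l).length = l.length := by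
  induction r generalizing l with
  | nil => rfl
  | cons a r ih => simp only [List.foldl_cons]; rw [ih]; simp

theorem pv_foldl_set_getElem? {α : Type} (g : Int → α → α) (d : α) (l : List α) (n : Nat) (j : Nat) :
    n ≤ l.length →
    ((PySem.List.pyRange 0 (n : Int) 1).foldl (fun s i => s.set i.toNat (g i (s.getD i.toNat d))) l)[j]?
      = if j < n then l[j]?.map (g (j : Int)) else l[j]? := by
  induction n generalizing j with
  | zero => intro _; simp [PySem.List.pyRange_one_eq_nil]
  | succ n ih =>
    intro hn
    have hr : PySem.List.pyRange 0 ((n + 1 : Nat) : Int) 1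
        = PySem.List.pyRange 0 (n : Int) 1 ++ [(n : Int)] := by
      have h : ((n + 1 : Nat) : Int) = (n : Int) + 1 := by push_cast; ring
      rw [h, PySem.List.pyRange_one_succ_right (by positivity)]
    have hn' : n ≤ l.length := Nat.le_of_succ_le hn
    have hlen := pv_foldl_set_length g d (PySem.List.pyRange 0 (n : Int) 1) l
    rw [hr, List.foldl_append]
    simp only [List.foldl_cons, List.foldl_nil, Int.toNat_natCast]
    have hself : (List.foldl (fun s i => s.set i.toNat (g i (s.getD i.toNat d)))
        l (PySem.List.pyRange 0 (n : Int) 1))[n]? = l[n]? := by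
      rw [ih n hn']; simp
    rw [List.getElem?_set]
    by_cases hj : n = j
    · subst hj
      have hnl : n < l.length := hn
      have hfold : (List.foldl (fun s i => s.set i.toNat (g i (s.getD i.toNat d)))
          l (PySem.List.pyRange 0 (n : Int) 1)).getD n d = l[n] := by
        rw [List.getD_eq_getElem?_getD, hself, List.getElem?_eq_getElem hnl]; rfl
      rw [if_pos rfl, hlen, if_pos hnl, hfold, if_pos (Nat.lt_succ_self n),
        List.getElem?_eq_getElem hnl]
      rfl
    · rw [if_neg hj, ih j hn']
      by_cases h1 : j < n
      · rw [if_pos h1, if_pos (Nat.lt_succ_of_lt h1)]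
      · rw [if_neg h1, if_neg (by omega)]

theorem pv_foldl_set_eq_mapIdx {α : Type} (g : Int → α → α) (d : α) (l : List α) :
    ((PySem.List.pyRange 0 (l.length : Int) 1).foldl (fun s i => s.set i.toNat (g i (s.getD i.toNat d))) l)
      = l.mapIdx (fun i x => g (i : Int) x) := by
  apply List.ext_getElem?
  intro j
  rw [pv_foldl_set_getElem? g d l l.length j le_rfl, List.getElem?_mapIdx]
  by_cases hj : j < l.length
  · simp [hj]
  · simp [if_neg hj, List.getElem?_eq_none (show l.length ≤ j by omega)]


-- conditional-set loop of A (source row), elementwise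
theorem pv_foldl_setif_length {α : Type} (q : Int → Bool) (v : α) (r : List Int) (l : List α) :
    (r.foldl (fun s i => if q i then s.set i.toNat v else s) l).length = l.length := by
  induction r generalizing l with
  | nil => rfl
  | cons a r ih =>
    simp only [List.foldl_cons]
    rw [ih]
    by_cases h : q a <;> simp [h]

theorem pv_foldl_setif_getElem? {α : Type} (q : Int → Bool) (v : α) (l : List α) (n : Nat) (j : Nat) :
    n ≤ l.length →
    ((PySem.List.pyRange 0 (n : Int) 1).foldl (fun s i => if q i then s.set i.toNat v else s) l)[j]?
      = if j < n then l[j]?.map (fun y => if q (j : Int) then v else y) else l[j]? := by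
  induction n generalizing j with
  | zero => intro _; simp [PySem.List.pyRange_one_eq_nil]
  | succ n ih =>
    intro hn
    have hr : PySem.List.pyRange 0 ((n + 1 : Nat) : Int) 1
        = PySem.List.pyRange 0 (n : Int) 1 ++ [(n : Int)] := by
      have h : ((n + 1 : Nat) : Int) = (n : Int) + 1 := by push_cast; ring
      rw [h, PySem.List.pyRange_one_succ_right (by positivity)]
    have hn' : n ≤ l.length := Nat.le_of_succ_le hn
    have hnl : n < l.length := hn
    have hlen := pv_foldl_setif_length q v (PySem.List.pyRange 0 (n : Int) 1) l
    rw [hr, List.foldl_append]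
    simp only [List.foldl_cons, List.foldl_nil, Int.toNat_natCast]
    by_cases hq : q (n : Int)
    · rw [if_pos hq, List.getElem?_set]
      by_cases hj : n = j
      · subst hj
        rw [if_pos rfl, hlen, if_pos hnl, if_pos (Nat.lt_succ_self n),
          List.getElem?_eq_getElem hnl]
        simp [hq]
      · rw [if_neg hj, ih j hn']
        by_cases h1 : j < n
        · rw [if_pos h1, if_pos (Nat.lt_succ_of_lt h1)]
        · rw [if_neg h1, if_neg (by omega)]
    · rw [if_neg hq, ih j hn']
      by_cases hj : n = j
      · subst hj
        rw [if_neg (lt_irrefl n), if_pos (Nat.lt_succ_self n),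
          List.getElem?_eq_getElem hnl]
        simp [hq]
      · by_cases h1 : j < n
        · rw [if_pos h1, if_pos (Nat.lt_succ_of_lt h1)]
        · rw [if_neg h1, if_neg (by omega)]

theorem pv_foldl_setif_eq_mapIdx {α : Type} (q : Int → Bool) (v : α) (l : List α) :
    ((PySem.List.pyRange 0 (l.length : Int) 1).foldl (fun s i => if q i then s.set i.toNat v else s) l)
      = l.mapIdx (fun i x => if q (i : Int) then v else x) := by
  apply List.ext_getElem?
  intro j
  rw [pv_foldl_setif_getElem? q v l l.length j le_rfl, List.getElem?_mapIdx]
  by_cases hj : j < l.length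
  · simp [hj]
  · simp [if_neg hj, List.getElem?_eq_none (show l.length ≤ j by omega)]

-- generic list rewrites used to align the two shapes
theorem pv_mapIdx_map {α β γ : Type} (f : α → β) (g : Nat → β → γ) (l : List α) :
    (l.map f).mapIdx g = l.mapIdx (fun i x => g i (f x)) := by
  apply List.ext_getElem?
  intro j
  simp [List.getElem?_mapIdx, Function.comp_def]

theorem pv_mapIdx_const {α β : Type} (f : α → β) (l : List α) :
    l.mapIdx (fun _ x => f x) = l.map f := by
  apply List.ext_getElem?
  intro j
  simp [List.getElem?_mapIdx]

theorem pv_map_const_pyRange {α : Type} (k : Nat) (z : α) :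
    (PySem.List.pyRange 0 (k : Int) 1).map (fun _ => z) = List.replicate k z := by
  apply List.eq_replicate_iff.mpr
  refine ⟨by simp [PySem.List.length_pyRange_one], ?_⟩
  intro b hb
  rcases List.mem_map.mp hb with ⟨_, _, h⟩
  exact h.symm

theorem pv_source_row (q : Int → Bool) (v : Int) (n : Nat) :
    (((PySem.List.pyRange 0 (n : Int) 1).map (fun _ => (0 : Int))).mapIdx
        (fun i x => if q (i : Int) then v else x))
      = (PySem.List.pyRange 0 (n : Int) 1).map (fun i => if q i then v else 0) := by
  apply List.ext_getElem?
  intro j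
  rw [List.getElem?_mapIdx]
  by_cases hj : j < n
  · rw [PySem.List.getElem?_map_pyRange_zero _ _ _ hj, PySem.List.getElem?_map_pyRange_zero _ _ _ hj]
    rfl
  · have h1 : ((PySem.List.pyRange 0 (n : Int) 1).map (fun _ => (0 : Int))).length ≤ j := by
      simp [PySem.List.length_pyRange_one]; omega
    have h2 : ((PySem.List.pyRange 0 (n : Int) 1).map (fun i => if q i then v else 0)).length ≤ j := by
      simp [PySem.List.length_pyRange_one]; omega
    rw [List.getElem?_eq_none h1, List.getElem?_eq_none h2]
    rfl

theorem pv_contains_succ (l : List Int) (i : Int) :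
    (l.map (fun e => e + 1)).contains i = l.contains (i - 1) := by
  induction l with
  | nil => rfl
  | cons a l ih =>
    simp only [List.map_cons, List.contains_cons, ih]
    by_cases h1 : i = a + 1
    · have h2 : i - 1 = a := by omega
      simp [h1, h2]
    · have h2 : i - 1 ≠ a := by omega
      have e1 : (i == a + 1) = false := by simpa using h1
      have e2 : (i - 1 == a) = false := by simpa using h2
      rw [e1, e2]

-- full characterization of A's output
theorem pvA_eq (entrances exits : List Int) (matrix : List (List Int)) :
    transform_matrix_into_single_source_and_sink entrances exits matrix
      = ([0] ++ (PySem.List.pyRange 0 (matrix.length : Int) 1).map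
            (fun i => if entrances.contains i then (2000000 : Int) else 0)
          ++ [if exits.contains (-1) then (2000000 : Int) else 0])
        :: (matrix.mapIdx (fun i r => [0] ++ r ++ [if exits.contains (i : Int) then (2000000 : Int) else 0])
          ++ [List.replicate (matrix.length + 2) (0 : Int)]) := by
  simp only [transform_matrix_into_single_source_and_sink]
  rw [pv_foldl_setif_eq_mapIdx (fun i => entrances.contains i) pyMaxFlow, pv_source_row]
  rw [pv_foldl_set_eq_mapIdx (fun _ r => ([0] : List Int) ++ r) ([] : List Int),
    pv_mapIdx_const (fun r => ([0] : List Int) ++ r)]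
  rw [pv_foldl_set_eq_mapIdx
    (fun i r => r ++ [if (exits.map (fun e => e + 1)).contains i then pyMaxFlow else 0])
    ([] : List Int)]
  simp only [pv_contains_succ, List.singleton_append, List.map_cons, List.mapIdx_cons,
    List.getD_cons_zero, pv_mapIdx_map]
  simp only [pyMaxFlow, Nat.cast_zero, CharP.cast_eq_zero, zero_sub, Nat.cast_add, Nat.cast_one,
    add_sub_cancel_right, pv_map_const_pyRange]
  have hlen : (0 :: List.map (fun i => if entrances.contains i = true then (2000000 : Int) else 0)
        (PySem.List.pyRange 0 (matrix.length : Int) 1) ++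
      [if exits.contains (-1) = true then (2000000 : Int) else 0]).length = matrix.length + 2 := by
    simp [PySem.List.length_pyRange_one]
  rw [hlen]
  rfl

-- ===== B-side lemmas =====

-- membership in set(xs) is membership in xs
theorem pv_set_contains (xs : List Int) (v : Int) :
    PySem.Set.contains (PySem.Set.ofList xs) v = xs.contains v := by
  simp only [PySem.Set.contains]
  by_cases h : v ∈ xs
  · simp [List.contains_iff_mem, h, (PySem.Set.mem_ofList xs v).mpr h]
  · simp [List.contains_iff_mem, h, fun hc => h ((PySem.Set.mem_ofList xs v).mp hc)]

-- range(0, m+2) split into first index, middle indices 1..m, last index m+1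
theorem pv_range_split (m : Nat) :
    PySem.List.pyRange 0 ((m : Int) + 2) 1
      = [(0 : Int)] ++ (List.range m).map (fun k : Nat => (1 : Int) + (k : Int)) ++ [(m : Int) + 1] := by
  rw [PySem.List.pyRange_one_append 0 1 ((m : Int) + 2) (by omega) (by omega),
      PySem.List.pyRange_one_append 1 ((m : Int) + 1) ((m : Int) + 2) (by omega) (by omega)]
  have h1 : PySem.List.pyRange 0 1 1 = [(0 : Int)] := by decide
  have h2 : PySem.List.pyRange 1 ((m : Int) + 1) 1
      = (List.range m).map (fun k : Nat => (1 : Int) + (k : Int)) := by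
    induction m with
    | zero => simp [PySem.List.pyRange_one_eq_nil]
    | succ m ih =>
      have hc : (((m + 1 : Nat) : Int)) + 1 = ((m : Int) + 1) + 1 := by push_cast; ring
      rw [hc, PySem.List.pyRange_one_succ_right (by omega), ih, List.range_succ, List.map_append]
      simp
      omega
  have h3 : PySem.List.pyRange ((m : Int) + 1) ((m : Int) + 2) 1 = [(m : Int) + 1] := by
    have : (m : Int) + 2 = ((m : Int) + 1) + 1 := by ring
    rw [this, PySem.List.pyRange_one_singleton]
  rw [h1, h2, h3, List.append_assoc]

-- a list is the range-indexed map of its own entries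
theorem pv_mapRange_getD (r : List Int) :
    (List.range r.length).map (fun t => r.getD t 0) = r := by
  apply List.ext_getElem?
  intro j
  by_cases hj : j < r.length
  · simp [hj, List.getD_eq_getElem r 0 hj, List.getElem?_eq_getElem hj]
  · simp [hj, List.getElem?_eq_none (show r.length ≤ j by omega)]

-- mapIdx as a map over the index range
theorem pv_mapIdx_eq_map_range {α β : Type} (g : Nat → α → β) (l : List α) (d : α) :
    l.mapIdx g = (List.range l.length).map (fun k => g k (l.getD k d)) := by
  apply List.ext_getElem?
  intro j
  by_cases hj : j < l.length
  · simp [List.getElem?_mapIdx, hj, List.getElem?_eq_getElem hj, List.getD_eq_getElem l d hj]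
  · simp [List.getElem?_mapIdx, hj, List.getElem?_eq_none (show l.length ≤ j by omega)]

-- full characterization of B's output
theorem pvB_eq (entrances exits : List Int) (matrix : List (List Int)) :
    transform_matrix_into_single_source_and_sink_alt entrances exits matrix
      = ([0] ++ (PySem.List.pyRange 0 (matrix.length : Int) 1).map
            (fun i => if entrances.contains i then (2000000 : Int) else 0)
          ++ [if exits.contains (-1) then (2000000 : Int) else 0])
        :: (matrix.mapIdx (fun i r => [0] ++ r ++ [if exits.contains (i : Int) then (2000000 : Int) else 0])
          ++ [List.replicate (matrix.length + 2) (0 : Int)]) := by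
  simp only [transform_matrix_into_single_source_and_sink_alt]
  rw [pv_range_split matrix.length, List.map_append, List.map_append]
  simp only [List.map_cons, List.map_nil, List.map_map]
  conv_rhs => rw [← List.singleton_append, ← List.append_assoc]
  congr 1
  · congr 1
    · -- source row
      simp only [true_or, ite_true]
      rw [pv_range_split matrix.length]
      simp only [List.map_append, List.map_cons, List.map_nil, List.map_map,
        List.cons.injEq, and_true]
      congr 1
      · congr 1
        · -- middle columns of the source row: entrance flags
          rw [PySem.List.pyRange_zero_nat, List.map_map]
          apply List.map_congr_left
          intro t ht
          have htn : t < matrix.length := List.mem_range.mp ht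
          simp only [Function.comp_apply]
          rw [if_neg (show ¬((1 : Int) + (t : Int) = 0 ∨ (0 : Int) = (matrix.length : Int) + 1) by omega),
            if_neg (show ¬((1 : Int) + (t : Int) = (matrix.length : Int) + 2 - 1) by omega),
            show (1 : Int) + (t : Int) - 1 = (t : Int) by omega, pv_set_contains]
      · -- last column of the source row: exit flag for -1
        congr 1
        rw [if_neg (show ¬((matrix.length : Int) + 1 = 0 ∨ (0 : Int) = (matrix.length : Int) + 1) by omega),
          if_pos (show (matrix.length : Int) + 1 = (matrix.length : Int) + 2 - 1 by omega),
          show (0 : Int) - 1 = (-1 : Int) by omega, pv_set_contains]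
    · -- middle rows
      rw [pv_mapIdx_eq_map_range (fun i r => ([0] : List Int) ++ r ++ [if exits.contains (i : Int) then (2000000 : Int) else 0]) matrix []]
      apply List.map_congr_left
      intro k hk
      have hkn : k < matrix.length := List.mem_range.mp hk
      simp only [Function.comp_apply]
      beta_reduce
      simp only [show (1 : Int) + (k : Int) - 1 = (k : Int) from by omega, PySem.List.pyGetD_natCast]
      rw [if_neg (show ¬((1 : Int) + (k : Int) = 0 ∨ (1 : Int) + (k : Int) = (matrix.length : Int) + 1) by omega)]
      rw [pv_range_split (matrix.getD k []).length]
      simp only [List.map_append, List.map_cons, List.map_nil, List.map_map, true_or, ite_true]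
      congr 1
      · congr 1
        · -- middle columns of row k: the original entries
          refine Eq.trans (List.map_congr_left ?_) (pv_mapRange_getD (matrix.getD k []))
          intro t ht
          have htn : t < (matrix.getD k []).length := List.mem_range.mp ht
          simp only [Function.comp_apply]
          rw [if_neg (show ¬((1 : Int) + (t : Int) = 0 ∨ (1 : Int) + (k : Int) = (matrix.length : Int) + 1) by omega),
            if_neg (show ¬((1 : Int) + (t : Int) = ((matrix.getD k []).length : Int) + 2 - 1) by omega),
            if_neg (show ¬((1 : Int) + (k : Int) = 0) by omega),
            show (1 : Int) + (t : Int) - 1 = (t : Int) by omega, PySem.List.pyGetD_natCast]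
      · -- last column of row k: exit flag for k
        congr 1
        rw [if_neg (show ¬(((matrix.getD k []).length : Int) + 1 = 0 ∨ (1 : Int) + (k : Int) = (matrix.length : Int) + 1) by omega),
          if_pos (show ((matrix.getD k []).length : Int) + 1 = ((matrix.getD k []).length : Int) + 2 - 1 by omega),
          pv_set_contains]
  · -- sink row
    simp only [or_true, ite_true]
    have hc : ((matrix.length : Int) + 2) = (((matrix.length + 2 : Nat)) : Int) := by push_cast; ring
    rw [hc, pv_map_const_pyRange]

-- ===== VERDICT (by name: the statement is the Claim_ definition above) =====
theorem transform_matrix_into_single_source_and_sink_spec : Claim_equal_transform_matrix_into_single_source_and_sink := by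
  intro entrances exits matrix _
  unfold Spec_transform_matrix_into_single_source_and_sink
  rw [pvA_eq, pvB_eq]
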